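-- pv_equiv track=rewrite | github.com/Romanitou31/ProjetInterpromo2020 | Codes_et_fichiers_pour_OSIRIM/Scraping_Airlines.py | transformColInDic
-- ===== SOURCE A (Python) =====
-- def transformColInDic(col_dic: dict):
--     """ Transforms a dictionary into a set of lists in order to put them in the dataframe.
--     Parameters:
--         col_dic = columns
--     Outers:
--         Date_Visit = Date of comment
--         Terminal_Cleanliness = Confort of seat
--         Food_Beverages = Quality of food and beverages
--         Wifi_Connectivity = Quality of connection
--         Airport_Staff = Competence of airport staff
--         Recommended = Recommandation of user
--         Type_Of_Traveller = Situation of user (couple, single)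
--         Queuing_Times = Notation of Queuing Times in the airport
--         Terminal_Seating = Confort of terminal seat
--         Terminal_Signs = Quality of terminal signs
--         Airport_shopping = Quality of airport shopping
--         Experience_At_Airport = Depart or arrival in the airport
--     """
--     Date_Visit = []
--     Terminal_Cleanliness = []
--     Food_Beverages = []
--     Wifi_Connectivity = []
--     Airport_Staff = []
--     Recommended = []
--     Type_Of_Traveller = []
--     Queuing_Times = []
--     Terminal_Seating = []
--     Airport_shopping = []
--     Terminal_Signs = []
--     Experience_At_Airport = []
--
--     for i in range(0, len(col_dic)):
--         if 'Date Visit' in (col_dic[i]).keys():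
--             Date_Visit.append((col_dic[i]['Date Visit']))
--         else:
--             Date_Visit.append(' ')
--
--         if ' Terminal Cleanliness' in (col_dic[i]).keys():
--             Terminal_Cleanliness.append((col_dic[i][' Terminal Cleanliness']))
--         else:
--             Terminal_Cleanliness.append(' ')
--
--         if ' Food Beverages' in (col_dic[i]).keys():
--             Food_Beverages.append((col_dic[i][' Food Beverages']))
--         else:
--             Food_Beverages.append(' ')
--
--         if ' Wifi Connectivity' in (col_dic[i]).keys():
--             Wifi_Connectivity.append((col_dic[i][' Wifi Connectivity']))
--         else:
--             Wifi_Connectivity.append(' ')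
--
--         if ' Airport Staff' in (col_dic[i]).keys():
--             Airport_Staff.append((col_dic[i][' Airport Staff']))
--         else:
--             Airport_Staff.append(' ')
--
--         if ' Recommended' in (col_dic[i]).keys():
--             Recommended.append((col_dic[i][' Recommended']))
--         else:
--             Recommended.append(' ')
--
--         if 'Type Of Traveller' in (col_dic[i]).keys():
--             Type_Of_Traveller.append((col_dic[i]['Type Of Traveller']))
--         else:
--             Type_Of_Traveller.append(' ')
--
--         if 'Queuing Times' in (col_dic[i]).keys():
--             Queuing_Times.append((col_dic[i]['Queuing Times']))
--         else:
--             Queuing_Times.append(' ')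
--
--         if ' Terminal Seating' in (col_dic[i]).keys():
--             Terminal_Seating.append((col_dic[i][' Terminal Seating']))
--         else:
--             Terminal_Seating.append(' ')
--
--         if ' Airport Shopping' in (col_dic[i]).keys():
--             Airport_shopping.append((col_dic[i][' Airport Shopping']))
--         else:
--             Airport_shopping.append(' ')
--
--         if ' Terminal Signs' in (col_dic[i]).keys():
--             Terminal_Signs.append((col_dic[i][' Terminal Signs']))
--         else:
--             Terminal_Signs.append(' ')
--
--         if 'Experience At Airport' in (col_dic[i]).keys():
--             Experience_At_Airport.append((col_dic[i]['Experience At Airport']))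
--         else:
--             Experience_At_Airport.append(' ')
--
--     return Date_Visit, Terminal_Cleanliness, Food_Beverages, Wifi_Connectivity, Airport_Staff, Recommended, Type_Of_Traveller, Queuing_Times, Terminal_Seating, Terminal_Signs, Airport_shopping, Experience_At_Airport
-- ===== SOURCE B (Python) =====
-- def transformColInDic(col_dic: dict):
--     """Column-major rebuild: one independent pass per output column."""
--     KEYS = ['Date Visit', ' Terminal Cleanliness', ' Food Beverages',
--             ' Wifi Connectivity', ' Airport Staff', ' Recommended',
--             'Type Of Traveller', 'Queuing Times', ' Terminal Seating',
--             ' Terminal Signs', ' Airport Shopping', 'Experience At Airport']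
--     return tuple([col_dic[i].get(key, ' ') for i in range(len(col_dic))]
--                  for key in KEYS)
-- ===== Notes on version B (the rewrite author's own statement) =====
-- stated objective: idiomatic
-- what changed: Replaces A's row-major single pass with 12 parallel accumulators and 12 per-row if/else branches by a column-major transpose: an ordered list of the 12 source keys and one independent comprehension per output column using col_dic[i].get(key, ' ').
import Mathlib
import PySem

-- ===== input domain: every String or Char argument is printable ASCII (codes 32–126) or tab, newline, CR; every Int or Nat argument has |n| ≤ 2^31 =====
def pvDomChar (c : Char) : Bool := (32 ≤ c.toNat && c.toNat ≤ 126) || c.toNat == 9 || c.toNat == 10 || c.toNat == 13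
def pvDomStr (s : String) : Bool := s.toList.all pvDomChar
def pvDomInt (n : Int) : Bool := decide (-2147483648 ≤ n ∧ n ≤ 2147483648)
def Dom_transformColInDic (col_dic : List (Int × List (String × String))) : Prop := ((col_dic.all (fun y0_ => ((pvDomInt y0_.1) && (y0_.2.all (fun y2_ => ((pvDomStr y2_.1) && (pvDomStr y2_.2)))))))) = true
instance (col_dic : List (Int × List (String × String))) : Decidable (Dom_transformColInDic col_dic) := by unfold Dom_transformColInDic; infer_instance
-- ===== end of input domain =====

-- B is a column-major rebuild (one independent pass per output column) instead of A's
-- row-major single pass with 12 accumulators; same return value, objective: idiomatic.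

-- ===== PORT A =====
-- col_dic[i] for the outer dict (KeyError excluded by Pre_; default [] is never reached inside Pre_)
def tcidRow (col_dic : List (Int × List (String × String))) (i : Int) : PySem.Dict String String :=
  PySem.Dict.mk (((PySem.Dict.mk col_dic).get? i).getD [])

-- the loop body of A: 12 list accumulators, each appended per row (tuple in A's return order)
def tcidStep (col_dic : List (Int × List (String × String)))
    (acc : List String × List String × List String × List String × List String × List String × List String × List String × List String × List String × List String × List String)
    (i : Int) :
    List String × List String × List String × List String × List String × List String × List String × List String × List String × List String × List String × List String :=
  match acc with
  | (dv, tc, fb, wc, ast, rc, tt, qt, tse, tsi, ash, ea) =>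
    let row := tcidRow col_dic i
    ((if row.contains "Date Visit" then dv ++ [(row.get? "Date Visit").getD " "] else dv ++ [" "]),
     (if row.contains " Terminal Cleanliness" then tc ++ [(row.get? " Terminal Cleanliness").getD " "] else tc ++ [" "]),
     (if row.contains " Food Beverages" then fb ++ [(row.get? " Food Beverages").getD " "] else fb ++ [" "]),
     (if row.contains " Wifi Connectivity" then wc ++ [(row.get? " Wifi Connectivity").getD " "] else wc ++ [" "]),
     (if row.contains " Airport Staff" then ast ++ [(row.get? " Airport Staff").getD " "] else ast ++ [" "]),
     (if row.contains " Recommended" then rc ++ [(row.get? " Recommended").getD " "] else rc ++ [" "]),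
     (if row.contains "Type Of Traveller" then tt ++ [(row.get? "Type Of Traveller").getD " "] else tt ++ [" "]),
     (if row.contains "Queuing Times" then qt ++ [(row.get? "Queuing Times").getD " "] else qt ++ [" "]),
     (if row.contains " Terminal Seating" then tse ++ [(row.get? " Terminal Seating").getD " "] else tse ++ [" "]),
     (if row.contains " Terminal Signs" then tsi ++ [(row.get? " Terminal Signs").getD " "] else tsi ++ [" "]),
     (if row.contains " Airport Shopping" then ash ++ [(row.get? " Airport Shopping").getD " "] else ash ++ [" "]),
     (if row.contains "Experience At Airport" then ea ++ [(row.get? "Experience At Airport").getD " "] else ea ++ [" "]))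

def transformColInDic (col_dic : List (Int × List (String × String))) : List String × List String × List String × List String × List String × List String × List String × List String × List String × List String × List String × List String :=
  (PySem.List.pyRange 0 (PySem.List.len col_dic) 1).foldl (tcidStep col_dic)
    ([], [], [], [], [], [], [], [], [], [], [], [])

-- ===== PORT B =====
-- one output column: [col_dic[i].get(key, ' ') for i in range(len(col_dic))]
def tcidCol (col_dic : List (Int × List (String × String))) (key : String) : List String :=
  (PySem.List.pyRange 0 (PySem.List.len col_dic) 1).map
    (fun i => (tcidRow col_dic i).getD key " ")

def transformColInDic_alt (col_dic : List (Int × List (String × String))) : List String × List String × List String × List String × List String × List String × List String × List String × List String × List String × List String × List String :=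
  (tcidCol col_dic "Date Visit",
   tcidCol col_dic " Terminal Cleanliness",
   tcidCol col_dic " Food Beverages",
   tcidCol col_dic " Wifi Connectivity",
   tcidCol col_dic " Airport Staff",
   tcidCol col_dic " Recommended",
   tcidCol col_dic "Type Of Traveller",
   tcidCol col_dic "Queuing Times",
   tcidCol col_dic " Terminal Seating",
   tcidCol col_dic " Terminal Signs",
   tcidCol col_dic " Airport Shopping",
   tcidCol col_dic "Experience At Airport")

-- ===== PRECONDITION & SPEC =====
-- Pre_ excludes exactly the inputs where Python A raises KeyError: some index
-- 0 ≤ i < len(col_dic) is not a key of the outer dict.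
def Pre_transformColInDic (col_dic : List (Int × List (String × String))) : Prop :=
  ((List.range col_dic.length).all
    (fun k => ((PySem.Dict.mk col_dic).get? (k : Int)).isSome)) = true
instance (col_dic : List (Int × List (String × String))) : Decidable (Pre_transformColInDic col_dic) := by unfold Pre_transformColInDic; infer_instance
def pvWitness_transformColInDic : (List (Int × List (String × String))) :=
  [((0 : Int), [("Date Visit", "good"), ("junk", "x")]), ((1 : Int), [])]

def Spec_transformColInDic (col_dic : List (Int × List (String × String))) (out : List String × List String × List String × List String × List String × List String × List String × List String × List String × List String × List String × List String) : Prop := out = transformColInDic_alt col_dic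
instance (col_dic : List (Int × List (String × String))) (out : List String × List String × List String × List String × List String × List String × List String × List String × List String × List String × List String × List String) : Decidable (Spec_transformColInDic col_dic out) := by
  unfold Spec_transformColInDic
  letI d2 : DecidableEq (List String × List String) := instDecidableEqProd
  letI d3 : DecidableEq (List String × List String × List String) := instDecidableEqProd
  letI d4 : DecidableEq (List String × List String × List String × List String) := instDecidableEqProd
  letI d5 : DecidableEq (List String × List String × List String × List String × List String) := instDecidableEqProd
  letI d6 : DecidableEq (List String × List String × List String × List String × List String × List String) := instDecidableEqProd
  letI d7 : DecidableEq (List String × List String × List String × List String × List String × List String × List String) := instDecidableEqProd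
  letI d8 : DecidableEq (List String × List String × List String × List String × List String × List String × List String × List String) := instDecidableEqProd
  letI d9 : DecidableEq (List String × List String × List String × List String × List String × List String × List String × List String × List String) := instDecidableEqProd
  letI d10 : DecidableEq (List String × List String × List String × List String × List String × List String × List String × List String × List String × List String) := instDecidableEqProd
  letI d11 : DecidableEq (List String × List String × List String × List String × List String × List String × List String × List String × List String × List String × List String) := instDecidableEqProd
  letI d12 : DecidableEq (List String × List String × List String × List String × List String × List String × List String × List String × List String × List String × List String × List String) := instDecidableEqProd
  exact d12 _ _

-- ===== CLAIM (what is proved, stated in full; the proofs are below) =====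
def Claim_equal_transformColInDic : Prop := ∀ (col_dic : List (Int × List (String × String))), Dom_transformColInDic col_dic → Pre_transformColInDic col_dic → Spec_transformColInDic col_dic (transformColInDic col_dic)

-- ===== LEMMAS AND PROOFS =====

-- A's per-cell value equals B's `.get(key, ' ')`
theorem tcid_cell (d : PySem.Dict String String) (k : String) :
    (if d.contains k then (d.get? k).getD " " else (" " : String)) = d.getD k " " := by
  rw [PySem.Dict.getD_eq_get?_getD, PySem.Dict.contains_eq_isSome_get?]
  cases d.get? k <;> simp

theorem tcid_app_ite {α : Type} (c : Prop) [Decidable c] (a : List α) (x y : α) :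
    (if c then a ++ [x] else a ++ [y]) = a ++ [if c then x else y] := by
  split <;> rfl

-- the row-major fold with 12 accumulators is the 12 column maps
theorem tcid_foldl (col_dic : List (Int × List (String × String))) (l : List Int)
    (a1 a2 a3 a4 a5 a6 a7 a8 a9 a10 a11 a12 : List String) :
    l.foldl (tcidStep col_dic) (a1, a2, a3, a4, a5, a6, a7, a8, a9, a10, a11, a12) =
      (a1 ++ l.map (fun i => (tcidRow col_dic i).getD "Date Visit" " "),
       a2 ++ l.map (fun i => (tcidRow col_dic i).getD " Terminal Cleanliness" " "),
       a3 ++ l.map (fun i => (tcidRow col_dic i).getD " Food Beverages" " "),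
       a4 ++ l.map (fun i => (tcidRow col_dic i).getD " Wifi Connectivity" " "),
       a5 ++ l.map (fun i => (tcidRow col_dic i).getD " Airport Staff" " "),
       a6 ++ l.map (fun i => (tcidRow col_dic i).getD " Recommended" " "),
       a7 ++ l.map (fun i => (tcidRow col_dic i).getD "Type Of Traveller" " "),
       a8 ++ l.map (fun i => (tcidRow col_dic i).getD "Queuing Times" " "),
       a9 ++ l.map (fun i => (tcidRow col_dic i).getD " Terminal Seating" " "),
       a10 ++ l.map (fun i => (tcidRow col_dic i).getD " Terminal Signs" " "),
       a11 ++ l.map (fun i => (tcidRow col_dic i).getD " Airport Shopping" " "),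
       a12 ++ l.map (fun i => (tcidRow col_dic i).getD "Experience At Airport" " ")) := by
  induction l generalizing a1 a2 a3 a4 a5 a6 a7 a8 a9 a10 a11 a12 with
  | nil => simp
  | cons x xs ih =>
    rw [List.foldl_cons]
    show xs.foldl (tcidStep col_dic) (tcidStep col_dic (a1, a2, a3, a4, a5, a6, a7, a8, a9, a10, a11, a12) x) = _
    rw [tcidStep]
    simp only [tcid_app_ite, tcid_cell]
    rw [ih]
    simp [List.append_assoc]

-- ===== VERDICT (by name: the statement is the Claim_ definition above) =====
theorem transformColInDic_spec : Claim_equal_transformColInDic := by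
  intro col_dic _hd _hp
  unfold Spec_transformColInDic transformColInDic transformColInDic_alt tcidCol
  rw [tcid_foldl]
  simp
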